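-- pv_equiv track=rewrite | github.com/reskyfadil/LAB-AP-06-2023 | H071231049/Praktikum-5/TP5_1_H071231049.py | pergabungan
-- ===== SOURCE A (Python) =====
-- def pergabungan(kata1, kata2):
--     var = ''
--     panjang_kata = max(len(kata1), len(kata2))
--
--     for i in range(panjang_kata):
--         if i < len(kata1):
--             var += kata1[i]
--         if i < len(kata2):
--             var += kata2[-(i + 1)]
--     return var
-- ===== SOURCE B (Python) =====
-- def pergabungan(kata1, kata2):
--     # Closed-form index map: output position k is computed directly from k,
--     # with no interleaving loop, no reversed copy and no tail slice.
--     n1, n2 = len(kata1), len(kata2)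
--     out = []
--     for k in range(n1 + n2):
--         q, r = divmod(k, 2)
--         if q < n1 and q < n2:
--             out.append(kata1[q] if r == 0 else kata2[n2 - 1 - q])
--         elif n1 > n2:
--             out.append(kata1[k - n2])
--         else:
--             out.append(kata2[n2 - 1 - (k - n1)])
--     return ''.join(out)
-- ===== Notes on version B (the rewrite author's own statement) =====
-- stated objective: alternative
-- what changed: B replaces A's interleaving loop (two guarded appends per step over max(len1,len2)) by a closed-form output-index map: for each output position k it computes arithmetically (via k//2, k%2 and leftover offsets) which single source character goes there, reading kata2 from the back by index without building a reversed copy, and joins the characters once.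
import Mathlib
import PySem

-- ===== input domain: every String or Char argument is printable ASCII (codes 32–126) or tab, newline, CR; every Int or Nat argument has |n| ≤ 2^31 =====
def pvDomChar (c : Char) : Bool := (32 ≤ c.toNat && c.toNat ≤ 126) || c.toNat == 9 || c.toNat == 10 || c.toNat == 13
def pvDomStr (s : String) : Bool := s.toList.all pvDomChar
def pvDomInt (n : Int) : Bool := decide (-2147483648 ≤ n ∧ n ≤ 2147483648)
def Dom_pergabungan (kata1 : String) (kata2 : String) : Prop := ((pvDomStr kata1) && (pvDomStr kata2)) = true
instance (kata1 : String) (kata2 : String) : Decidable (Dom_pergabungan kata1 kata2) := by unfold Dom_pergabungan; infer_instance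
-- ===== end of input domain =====

-- B computes each output character directly from its output index k by a closed-form
-- index map (k/2, k%2 and leftover arithmetic), instead of A's interleaving loop that
-- appends up to two guarded characters per step; objective: alternative.

-- ===== PORT A =====
-- loop body of A: two guarded character appends (indices are in range when the guard holds)
def stepA (s1 s2 : List Char) (var : List Char) (i : Int) : List Char :=
  let var := if i < (s1.length : Int) then var ++ [PySem.List.pyGetD s1 i 'A'] else var
  if i < (s2.length : Int) then var ++ [PySem.List.pyGetD s2 (-(i + 1)) 'A'] else var

def pergabungan (kata1 : String) (kata2 : String) : String :=
  let s1 := kata1.toList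
  let s2 := kata2.toList
  let panjang_kata : Int := max (s1.length : Int) (s2.length : Int)
  String.ofList ((PySem.List.pyRange 0 panjang_kata 1).foldl (stepA s1 s2) [])

-- ===== PORT B =====
-- B's per-index character: output position k mapped arithmetically to a source character
-- (all the indices B's Python uses are nonnegative and in range for k < n1+n2, so getD
-- with Nat arithmetic is exact)
def chB (s1 s2 : List Char) (k : Nat) : Char :=
  let n1 := s1.length
  let n2 := s2.length
  let q := k / 2
  if q < n1 ∧ q < n2 then
    (if k % 2 = 0 then s1.getD q 'A' else s2.getD (n2 - 1 - q) 'A')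
  else if n2 < n1 then s1.getD (k - n2) 'A'
  else s2.getD (n2 - 1 - (k - n1)) 'A'

def pergabungan_alt (kata1 : String) (kata2 : String) : String :=
  let s1 := kata1.toList
  let s2 := kata2.toList
  String.ofList ((List.range (s1.length + s2.length)).foldl
    (fun acc k => acc ++ [chB s1 s2 k]) [])

-- ===== PRECONDITION & SPEC =====
def Spec_pergabungan (kata1 : String) (kata2 : String) (out : String) : Prop := out = pergabungan_alt kata1 kata2
instance (kata1 : String) (kata2 : String) (out : String) : Decidable (Spec_pergabungan kata1 kata2 out) := by unfold Spec_pergabungan; infer_instance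

-- ===== CLAIM (what is proved, stated in full; the proofs are below) =====
def Claim_equal_pergabungan : Prop := ∀ (kata1 : String) (kata2 : String), Dom_pergabungan kata1 kata2 → Spec_pergabungan kata1 kata2 (pergabungan kata1 kata2)

-- ===== LEMMAS AND PROOFS =====

-- the common value: interleave xs with ys element-wise, then the leftover of the longer one
def core : List Char → List Char → List Char
  | [], ys => ys
  | x :: xs, [] => x :: xs
  | x :: xs, y :: ys => x :: y :: core xs ys

theorem core_nil_right (xs : List Char) : core xs [] = xs := by
  cases xs <;> rfl

theorem drop_cons_getD (l : List Char) (j : Nat) (h : j < l.length) :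
    l.drop j = l.getD j 'A' :: l.drop (j + 1) := by
  rw [List.drop_eq_getElem_cons h, List.getD_eq_getElem l 'A' h]

theorem rev_get (s2 : List Char) (j : Nat) (h : j < s2.length) :
    PySem.List.pyGetD s2 (-((j : Int) + 1)) 'A' = s2.reverse.getD j 'A' := by
  have hc : ((j : Int) + 1) = ((j + 1 : Nat) : Int) := by push_cast; ring
  rw [hc, PySem.List.pyGetD_neg_natCast s2 (j + 1) 'A' (by omega) (by omega)]
  rw [List.getD_eq_getElem s2.reverse 'A' (by rw [List.length_reverse]; omega)]
  rw [List.getElem_reverse]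
  have hi : s2.length - (j + 1) = s2.length - 1 - j := by omega
  simp only [hi]

theorem A_gen (s1 s2 : List Char) :
    ∀ (n j : Nat) (acc : List Char), max s1.length s2.length = j + n →
    (PySem.List.pyRange (j : Int) (max (s1.length : Int) (s2.length : Int)) 1).foldl
      (stepA s1 s2) acc
    = acc ++ core (s1.drop j) (s2.reverse.drop j) := by
  intro n
  induction n with
  | zero =>
    intro j acc h
    rw [PySem.List.pyRange_one_eq_nil (by omega)]
    rw [List.drop_eq_nil_of_le (as := s1) (by omega),
        List.drop_eq_nil_of_le (as := s2.reverse) (by rw [List.length_reverse]; omega)]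
    simp [core]
  | succ n ih =>
    intro j acc h
    rw [PySem.List.pyRange_one_cons (by omega), List.foldl_cons]
    rw [show (j : Int) + 1 = ((j + 1 : Nat) : Int) by push_cast; ring]
    rw [ih (j + 1) _ (by omega)]
    simp only [stepA, Nat.cast_lt]
    by_cases h1 : j < s1.length
    · by_cases h2 : j < s2.length
      · rw [if_pos h2, if_pos h1, PySem.List.pyGetD_natCast, rev_get s2 j h2]
        rw [drop_cons_getD s1 j h1,
            drop_cons_getD s2.reverse j (by rw [List.length_reverse]; omega)]
        simp [core]
      · rw [if_neg h2, if_pos h1, PySem.List.pyGetD_natCast]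
        rw [List.drop_eq_nil_of_le (as := s2.reverse) (i := j)
              (by rw [List.length_reverse]; omega),
            List.drop_eq_nil_of_le (as := s2.reverse) (i := j + 1)
              (by rw [List.length_reverse]; omega)]
        rw [core_nil_right, core_nil_right, drop_cons_getD s1 j h1]
        simp
    · have h2 : j < s2.length := by omega
      rw [if_pos h2, if_neg h1, rev_get s2 j h2]
      rw [List.drop_eq_nil_of_le (as := s1) (i := j) (by omega),
          List.drop_eq_nil_of_le (as := s1) (i := j + 1) (by omega)]
      rw [drop_cons_getD s2.reverse j (by rw [List.length_reverse]; omega)]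
      simp [core]

-- B's index map with the reversal already applied: on the already-reversed second list
def gB (xs ys : List Char) (k : Nat) : Char :=
  if k / 2 < xs.length ∧ k / 2 < ys.length then
    (if k % 2 = 0 then xs.getD (k / 2) 'A' else ys.getD (k / 2) 'A')
  else if ys.length < xs.length then xs.getD (k - ys.length) 'A'
  else ys.getD (k - xs.length) 'A'

theorem foldl_snoc (f : Nat → Char) (l : List Nat) :
    ∀ acc, l.foldl (fun a k => a ++ [f k]) acc = acc ++ l.map f := by
  induction l with
  | nil => intro acc; simp
  | cons x xs ih => intro acc; simp [ih]

theorem map_getD_range (l : List Char) :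
    (List.range l.length).map (fun k => l.getD k 'A') = l := by
  apply List.ext_getElem
  · simp
  · intro i h1 h2
    simp [List.getD, List.getElem?_eq_getElem h2]

theorem gB_shift (x y : Char) (xs ys : List Char) (k : Nat)
    (_hk : k < xs.length + ys.length) :
    gB (x :: xs) (y :: ys) (k + 2) = gB xs ys k := by
  have hdiv : (k + 2) / 2 = k / 2 + 1 := by omega
  have hmod : (k + 2) % 2 = k % 2 := by omega
  have hle : k / 2 ≤ k := Nat.div_le_self k 2
  simp only [gB, hdiv, hmod, List.length_cons]
  by_cases hc : k / 2 < xs.length ∧ k / 2 < ys.length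
  · rw [if_pos (by omega), if_pos hc]
    split <;> simp
  · rw [if_neg (by omega), if_neg hc]
    by_cases hl : ys.length < xs.length
    · rw [if_pos (by omega), if_pos hl]
      have hky : ys.length ≤ k := by
        rcases Nat.lt_or_ge (k / 2) ys.length with h | h
        · exact absurd ⟨by omega, h⟩ hc
        · omega
      have : k + 2 - (ys.length + 1) = (k - ys.length) + 1 := by omega
      simp [this]
    · rw [if_neg (by omega), if_neg hl]
      have hkx : xs.length ≤ k := by
        rcases Nat.lt_or_ge (k / 2) xs.length with h | h
        · exact absurd ⟨h, by omega⟩ hc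
        · omega
      have : k + 2 - (xs.length + 1) = (k - xs.length) + 1 := by omega
      simp [this]

theorem gB_core (xs : List Char) :
    ∀ ys : List Char, (List.range (xs.length + ys.length)).map (gB xs ys) = core xs ys := by
  induction xs with
  | nil =>
    intro ys
    have hg : ∀ k ∈ List.range ys.length, gB [] ys k = ys.getD k 'A' := by
      intro k _
      simp [gB]
    simp only [List.length_nil, Nat.zero_add, core]
    rw [List.map_congr_left hg, map_getD_range]
  | cons x xs ih =>
    intro ys
    cases ys with
    | nil =>
      have hg : ∀ k ∈ List.range (x :: xs).length, gB (x :: xs) [] k = (x :: xs).getD k 'A' := by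
        intro k _
        simp [gB]
      simp only [List.length_nil, Nat.add_zero, core_nil_right]
      rw [List.map_congr_left hg, map_getD_range]
    | cons y ys =>
      have hlen : (x :: xs).length + (y :: ys).length = xs.length + ys.length + 1 + 1 := by
        simp; omega
      rw [hlen, List.range_succ_eq_map, List.range_succ_eq_map]
      simp only [List.map_cons, List.map_map]
      have h0 : gB (x :: xs) (y :: ys) 0 = x := by simp [gB]
      have h1 : gB (x :: xs) (y :: ys) (Nat.succ 0) = y := by simp [gB]
      rw [h0, h1]
      have hshift : ∀ k ∈ List.range (xs.length + ys.length),
          (gB (x :: xs) (y :: ys) ∘ Nat.succ ∘ Nat.succ) k = gB xs ys k := by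
        intro k hk
        rw [List.mem_range] at hk
        simpa [Function.comp] using gB_shift x y xs ys k hk
      rw [List.map_congr_left hshift, ih ys]
      rfl

theorem getD_reverse (l : List Char) (i : Nat) (h : i < l.length) :
    l.getD (l.length - 1 - i) 'A' = l.reverse.getD i 'A' := by
  rw [List.getD_eq_getElem l 'A' (by omega),
      List.getD_eq_getElem l.reverse 'A' (by rw [List.length_reverse]; omega),
      List.getElem_reverse]

theorem chB_gB (s1 s2 : List Char) (k : Nat) (hk : k < s1.length + s2.length) :
    chB s1 s2 k = gB s1 s2.reverse k := by
  simp only [chB, gB, List.length_reverse]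
  by_cases hc : k / 2 < s1.length ∧ k / 2 < s2.length
  · rw [if_pos hc, if_pos hc]
    split
    · rfl
    · exact getD_reverse s2 (k / 2) hc.2
  · rw [if_neg hc, if_neg hc]
    by_cases hl : s2.length < s1.length
    · rw [if_pos hl, if_pos hl]
    · rw [if_neg hl, if_neg hl]
      exact getD_reverse s2 (k - s1.length) (by omega)

-- ===== VERDICT (by name: the statement is the Claim_ definition above) =====
theorem pergabungan_spec : Claim_equal_pergabungan := by
  intro kata1 kata2 _
  unfold Spec_pergabungan pergabungan pergabungan_alt
  have hA := A_gen kata1.toList kata2.toList (max kata1.toList.length kata2.toList.length)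
      0 [] (by omega)
  simp only [Nat.cast_zero, List.drop_zero, List.nil_append] at hA
  simp only [hA, foldl_snoc, List.nil_append]
  have hch : ∀ k ∈ List.range (kata1.toList.length + kata2.toList.length),
      chB kata1.toList kata2.toList k = gB kata1.toList kata2.toList.reverse k := by
    intro k hk
    rw [List.mem_range] at hk
    exact chB_gB _ _ k hk
  rw [List.map_congr_left hch]
  have := gB_core kata1.toList kata2.toList.reverse
  rw [show kata1.toList.length + kata2.toList.length
        = kata1.toList.length + kata2.toList.reverse.length by rw [List.length_reverse]]
  rw [this]
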